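-- pv_equiv track=rewrite | github.com/Tunde-cs/PalindromeChecker | main.py | try_overlapping_substrings
-- ===== SOURCE A (Python) =====
-- from collections import Counter
--
-- def is_palindrome(s):
--     """Check if a string is a palindrome."""
--     return s == s[::-1]
--
-- def try_overlapping_substrings(a, b):
--     """Try to form palindromes using overlapping substrings - key insight for baccab."""
--     all_palindromes = []
--
--     # The key insight: "baccab" can be formed by:
--     # Taking "bac" from first string + "cab" from second string, where "cab" overlaps with "bac"
--     # This means we can use characters from both strings in more flexible ways
--
--     # Strategy: For each substring from a, find a substring from b that can create a palindrome
--     # when concatenated, even if they share characters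
--
--     for start_a in range(len(a)):
--         for end_a in range(start_a + 1, len(a) + 1):
--             sa = a[start_a:end_a]
--
--             for start_b in range(len(b)):
--                 for end_b in range(start_b + 1, len(b) + 1):
--                     sb = b[start_b:end_b]
--
--                     # Try both concatenation orders
--                     for candidate in [sa + sb, sb + sa]:
--                         if is_palindrome(candidate):
--                             # Check if we can actually form this palindrome using available characters
--                             # This is the key: allow overlapping usage but verify character availability
--                             required = Counter(candidate)
--                             available = Counter(a + b)
--
--                             if all(available[c] >= required[c] for c in required):
--                                 all_palindromes.append(candidate)
--
--     # Special case handling: "bac" + "bac" should be able to form "baccab"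
--     # This requires recognizing that we can form "bac" + "cab" where "cab" is "bac" rearranged
--     if a == b:
--         # Try all permutations of the second string concatenated with substrings of first
--         from itertools import permutations
--
--         for start_a in range(len(a)):
--             for end_a in range(start_a + 1, len(a) + 1):
--                 sa = a[start_a:end_a]
--
--                 # Try all permutations of b
--                 for perm in set(permutations(b)):
--                     perm_str = ''.join(perm)
--
--                     for candidate in [sa + perm_str, perm_str + sa]:
--                         if is_palindrome(candidate) and len(candidate) <= 20:
--                             # Verify character count
--                             required = Counter(candidate)
--                             available = Counter(a + b)
--
--                             if all(available[c] >= required[c] for c in required):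
--                                 all_palindromes.append(candidate)
--
--     return list(set(all_palindromes))  # Remove duplicates
-- ===== SOURCE B (Python) =====
-- def try_overlapping_substrings(a, b):
--     """Same result as A: palindromic concatenations of one substring of a with one
--     substring of b (either order), plus -- when a == b -- palindromes sa+p / p+sa with p a
--     rearrangement of b and total length <= 20, constructed directly instead of
--     enumerating the n! permutations of b.  Returned sorted (the result is a set)."""
--     subs_a = {a[i:j] for i in range(len(a)) for j in range(i + 1, len(a) + 1)}
--     subs_b = {b[i:j] for i in range(len(b)) for j in range(i + 1, len(b) + 1)}
--     result = set()
--     for sa in subs_a: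
--         for sb in subs_b:
--             c1 = sa + sb
--             if c1 == c1[::-1]:
--                 result.add(c1)
--             c2 = sb + sa
--             if c2 == c2[::-1]:
--                 result.add(c2)
--     if a == b:
--         for sa in subs_a:
--             if len(sa) + len(b) <= 20:
--                 result.update(_pal_concats(sa, b))
--                 result.update(_pal_concats(sa[::-1], b))
--     return sorted(result)
--
--
-- def _pal_concats(sa, b):
--     """All palindromes sa + p with p a rearrangement of b (each exactly once)."""
--     k, n = len(sa), len(b)
--     if n < k:
--         # p is fully forced: p = reverse(sa[:n]); the leftover sa[n:] must be a palindrome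
--         tail = sa[:n][::-1]
--         mid = sa[n:]
--         if sorted(tail) == sorted(b) and mid == mid[::-1]:
--             return [sa + tail]
--         return []
--     # p = m + reverse(sa) with m a palindrome over the multiset of b minus the one of sa
--     rem = sorted(b)
--     for ch in sa:
--         if ch in rem:
--             rem.remove(ch)
--         else:
--             return []
--     # split the (sorted) remainder into pairs + at most one middle char
--     half = []
--     mid = ''
--     i = 0
--     while i < len(rem):
--         if i + 1 < len(rem) and rem[i] == rem[i + 1]:
--             half.append(rem[i])
--             i += 2
--         else:
--             if mid:
--                 return []
--             mid = rem[i]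
--             i += 1
--     out = []
--     for h in _distinct_perms(half):
--         hs = ''.join(h)
--         out.append(sa + hs + mid + hs[::-1] + sa[::-1])
--     return out
--
--
-- def _distinct_perms(l):
--     """Every distinct ordering of the multiset l, each exactly once."""
--     if not l:
--         return [[]]
--     res = []
--     for x in sorted(set(l)):
--         rest = list(l)
--         rest.remove(x)
--         for t in _distinct_perms(rest):
--             res.append([x] + t)
--     return res
-- ===== Notes on version B (the rewrite author's own statement) =====
-- stated objective: faster
-- what changed: B pairs only the DISTINCT substrings of a and b (dropping A's always-true Counter availability re-check), and when a == b it constructs the palindromic concatenations sa+p / p+sa directly from the multiset of b (forced mirror suffix + palindromic middle over the leftover characters) instead of enumerating all n! permutations of b; the result set is returned sorted.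
import Mathlib
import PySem

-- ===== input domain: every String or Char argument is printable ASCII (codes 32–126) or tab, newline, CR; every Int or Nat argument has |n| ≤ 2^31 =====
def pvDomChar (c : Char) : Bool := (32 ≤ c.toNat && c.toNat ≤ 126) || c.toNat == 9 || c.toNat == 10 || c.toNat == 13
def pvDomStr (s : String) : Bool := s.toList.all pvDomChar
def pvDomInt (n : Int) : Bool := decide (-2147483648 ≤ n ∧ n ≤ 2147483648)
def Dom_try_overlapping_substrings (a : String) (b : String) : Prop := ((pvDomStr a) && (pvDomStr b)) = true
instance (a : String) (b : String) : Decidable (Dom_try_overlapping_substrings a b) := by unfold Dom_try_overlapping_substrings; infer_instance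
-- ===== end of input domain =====

-- B pairs only the DISTINCT substrings of a and b (dropping A's always-true Counter
-- availability re-check), and when a == b it constructs the palindromic concatenations
-- directly from the multiset of b (forced mirror suffix + palindromic middle over the
-- leftover characters) instead of enumerating all n! permutations of b.  The returned
-- value is a Python set: its hash iteration order is not modelled, the output is compared
-- as a set, so both ports emit the canonical sorted order (B's Python returns it sorted).


-- ===== PORT A =====
-- all strings are handled on their code-point lists (PySem.Chars convention) and re-packed
-- with String.ofList at the very end
-- is_palindrome(s): s == s[::-1]; s[::-1] is s.reverse (PySem.List.slice?_none_none_neg_one)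
def pvIsPalA (s : List Char) : Bool := s == s.reverse

-- the Counter availability check: all(available[c] >= required[c] for c in required)
def pvCounterOK (cand avail : List Char) : Bool :=
  let required := PySem.Dict.counter cand
  let available := PySem.Dict.counter avail
  required.keys.all (fun c => decide (required.getD c 0 ≤ available.getD c 0))

-- the quadruple substring loop
def pvPart1A (al bl : List Char) : List (List Char) :=
  -- sa = a[start_a:end_a] and sb = b[start_b:end_b] are inlined at their two use sites
  (PySem.List.pyRange 0 (al.length : Int)).foldl (fun acc0 sA =>
    (PySem.List.pyRange (sA + 1) ((al.length : Int) + 1)).foldl (fun acc1 eA =>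
      (PySem.List.pyRange 0 (bl.length : Int)).foldl (fun acc2 sB =>
        (PySem.List.pyRange (sB + 1) ((bl.length : Int) + 1)).foldl (fun acc3 eB =>
          [PySem.List.slice al (some sA) (some eA) ++ PySem.List.slice bl (some sB) (some eB),
           PySem.List.slice bl (some sB) (some eB) ++ PySem.List.slice al (some sA) (some eA)].foldl
            (fun acc4 cand =>
              if pvIsPalA cand && pvCounterOK cand (al ++ bl) then acc4 ++ [cand] else acc4)
            acc3) acc2) acc1) acc0) []

-- the a == b block: substrings of a against set(permutations(b)); the iteration order of
-- that set only affects the append order, which the final set() forgets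
def pvPart2A (al bl : List Char) (acc : List (List Char)) : List (List Char) :=
  -- sa = a[start_a:end_a] is inlined at its two use sites
  (PySem.List.pyRange 0 (al.length : Int)).foldl (fun acc0 sA =>
    (PySem.List.pyRange (sA + 1) ((al.length : Int) + 1)).foldl (fun acc1 eA =>
      (PySem.Set.ofList (PySem.List.permutations bl bl.length)).foldl (fun acc2 perm =>
        [PySem.List.slice al (some sA) (some eA) ++ perm,
         perm ++ PySem.List.slice al (some sA) (some eA)].foldl (fun acc3 cand =>
          if pvIsPalA cand && decide ((cand.length : Int) ≤ 20) &&
              pvCounterOK cand (al ++ bl) then acc3 ++ [cand] else acc3)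
          acc2) acc1) acc0) acc

-- list(set(all_palindromes)): Python's set iteration order is hash-dependent and the output
-- is compared as a set, so the port emits the canonical sorted order
def try_overlapping_substrings (a : String) (b : String) : List String :=
  PySem.List.sorted
    ((PySem.Set.ofList
        (if a == b then pvPart2A a.toList b.toList (pvPart1A a.toList b.toList)
         else pvPart1A a.toList b.toList)).map String.ofList)
    (fun s => s) false

-- ===== PORT B =====
-- helper for the termination of pvDistinctPerms
theorem pvRemoveLen {l r : List Char} {x : Char}
    (h : PySem.List.remove? l x = some r) : r.length < l.length := by
  have hx : x ∈ l := by
    by_contra hx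
    simp [(PySem.List.remove?_eq_none_iff l x).2 hx] at h
  rw [PySem.List.remove?_eq_some_erase l x hx] at h
  injection h with h
  subst h
  have h1 := List.length_erase_of_mem hx
  have h2 := List.length_pos_of_mem hx
  omega

-- _distinct_perms(l): every distinct ordering of the multiset l
mutual
def pvDistinctPerms (l : List Char) : List (List Char) :=
  if l.isEmpty then [[]]
  else pvDPGo l (PySem.List.sorted (PySem.Set.ofList l) (fun c => c) false)
termination_by (l.length, l.length + 1)
decreasing_by
  apply Prod.Lex.right
  have h1 := PySem.Set.length_ofList_le l
  have h2 := PySem.List.length_sorted (PySem.Set.ofList l) (fun c : Char => c) false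
  omega
def pvDPGo (l : List Char) (cands : List Char) : List (List Char) :=
  match cands with
  | [] => []
  | x :: xs =>
    (match h : PySem.List.remove? l x with
     | some rest => (pvDistinctPerms rest).map (fun t => x :: t)
     | none => []) ++ pvDPGo l xs
termination_by (l.length, cands.length)
decreasing_by
  · exact Prod.Lex.left _ _ (pvRemoveLen h)
  · apply Prod.Lex.right
    have hc : (x :: xs).length = xs.length + 1 := rfl
    omega
end

-- the while-loop splitting the sorted remainder into pairs + at most one middle char,
-- ported structurally (each step consumes two equal chars or one middle char)
def pvPairUp : List Char → Option (List Char × List Char)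
  | [] => some ([], [])
  | [x] => some ([], [x])
  | x :: y :: t =>
    if x == y then (pvPairUp t).map (fun hm => (x :: hm.1, hm.2))
    else
      match pvPairUp (y :: t) with
      | some (h, []) => some (h, [x])
      | _ => none

-- _pal_concats(sa, b): all palindromes sa + p with p a rearrangement of b
def pvPalConcats (sa bl : List Char) : List (List Char) :=
  let k := sa.length
  let n := bl.length
  if n < k then
    let tail := (sa.take n).reverse        -- sa[:n][::-1]
    let mid := sa.drop n                   -- sa[n:]
    if (PySem.List.sorted tail (fun c => c) false ==
          PySem.List.sorted bl (fun c => c) false) && (mid == mid.reverse)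
    then [sa ++ tail] else []
  else
    -- rem = sorted(b); for ch in sa: remove ch or fail
    match sa.foldl (fun r? ch => r?.bind (fun r => PySem.List.remove? r ch))
        (some (PySem.List.sorted bl (fun c => c) false)) with
    | none => []
    | some rem =>
      match pvPairUp rem with
      | none => []
      | some (half, mid) =>
        (pvDistinctPerms half).map (fun h => sa ++ h ++ mid ++ h.reverse ++ sa.reverse)

-- {a[i:j] for i in range(len(a)) for j in range(i + 1, len(a) + 1)} before dedup
def pvSubs (l : List Char) : List (List Char) :=
  (PySem.List.pyRange 0 (l.length : Int)).flatMap (fun i =>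
    (PySem.List.pyRange (i + 1) ((l.length : Int) + 1)).map (fun j =>
      PySem.List.slice l (some i) (some j)))

-- the locals c1 = sa + sb, c2 = sb + sa and the intermediate set are inlined;
-- c == c[::-1]: s[::-1] is s.reverse (PySem.List.slice?_none_none_neg_one)
def pvPart1B (subsA subsB : PySem.Set (List Char)) : PySem.Set (List Char) :=
  subsA.foldl (fun acc sa =>
    subsB.foldl (fun acc2 sb =>
      if sb ++ sa == (sb ++ sa).reverse then
        PySem.Set.add
          (if sa ++ sb == (sa ++ sb).reverse then PySem.Set.add acc2 (sa ++ sb) else acc2)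
          (sb ++ sa)
      else
        (if sa ++ sb == (sa ++ sb).reverse then PySem.Set.add acc2 (sa ++ sb) else acc2))
      acc) PySem.Set.empty

def pvPart2B (subsA : PySem.Set (List Char)) (bl : List Char)
    (acc0 : PySem.Set (List Char)) : PySem.Set (List Char) :=
  subsA.foldl (fun acc sa =>
    if decide ((sa.length : Int) + (bl.length : Int) ≤ 20) then
      PySem.Set.update (PySem.Set.update acc (pvPalConcats sa bl))
        (pvPalConcats sa.reverse bl)
    else acc) acc0

-- the result set, returned sorted (sorted(result))
def try_overlapping_substrings_alt (a : String) (b : String) : List String :=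
  PySem.List.sorted
    ((if a == b then
        pvPart2B (PySem.Set.ofList (pvSubs a.toList)) b.toList
          (pvPart1B (PySem.Set.ofList (pvSubs a.toList)) (PySem.Set.ofList (pvSubs b.toList)))
      else
        pvPart1B (PySem.Set.ofList (pvSubs a.toList))
          (PySem.Set.ofList (pvSubs b.toList))).map String.ofList)
    (fun s => s) false

-- ===== PRECONDITION & SPEC =====
def Spec_try_overlapping_substrings (a : String) (b : String) (out : List String) : Prop := out = try_overlapping_substrings_alt a b
instance (a : String) (b : String) (out : List String) : Decidable (Spec_try_overlapping_substrings a b out) := by unfold Spec_try_overlapping_substrings; infer_instance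

-- ===== CLAIM (what is proved, stated in full; the proofs are below) =====
def Claim_equal_try_overlapping_substrings : Prop := ∀ (a : String) (b : String), Dom_try_overlapping_substrings a b → Spec_try_overlapping_substrings a b (try_overlapping_substrings a b)

-- ===== LEMMAS AND PROOFS =====

-- ---- generic fold helpers ----

theorem pvMemSetFoldl {α β : Type} (l : List β) (f : List α → β → List α)
    (Q : β → α → Prop) (hstep : ∀ s x c, c ∈ f s x ↔ c ∈ s ∨ Q x c)
    (init : List α) (c : α) :
    c ∈ l.foldl f init ↔ c ∈ init ∨ ∃ x ∈ l, Q x c := by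
  induction l generalizing init with
  | nil => simp
  | cons y ys ih =>
    simp only [List.foldl_cons]
    rw [ih, hstep init y c]
    simp only [List.mem_cons]
    constructor
    · rintro ((h | h) | ⟨x, hx, hq⟩)
      · exact Or.inl h
      · exact Or.inr ⟨y, Or.inl rfl, h⟩
      · exact Or.inr ⟨x, Or.inr hx, hq⟩
    · rintro (h | ⟨x, (rfl | hx), hq⟩)
      · exact Or.inl (Or.inl h)
      · exact Or.inl (Or.inr hq)
      · exact Or.inr ⟨x, hx, hq⟩

theorem pvNodupFoldl {α β : Type} (l : List β) (f : List α → β → List α)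
    (init : List α) (h : ∀ s x, s.Nodup → (f s x).Nodup)
    (hi : init.Nodup) : (l.foldl f init).Nodup := by
  induction l generalizing init with
  | nil => exact hi
  | cons y ys ih => exact ih _ (h init y hi)

-- ---- the Counter availability check is always true for the candidates A builds ----

theorem pvCounterOK_true (cand avail : List Char)
    (h : ∀ ch, List.count ch cand ≤ List.count ch avail) :
    pvCounterOK cand avail = true := by
  unfold pvCounterOK
  simp only [List.all_eq_true]
  intro c _
  simp only [PySem.Dict.getD_counter, decide_eq_true_eq]
  exact_mod_cast h c

theorem pvCountSlice_le (l : List Char) {i j : Int} (hi : 0 ≤ i) (hj : 0 ≤ j) (ch : Char) :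
    List.count ch (PySem.List.slice l (some i) (some j)) ≤ List.count ch l := by
  rw [PySem.List.slice_toNat l hi hj]
  exact List.Sublist.count_le ch ((List.take_sublist _ _).trans (List.drop_sublist ..))

-- ---- palindrome structure ----

theorem pvPalSandwich (u q : List Char) :
    (u ++ q ++ u.reverse).reverse = u ++ q ++ u.reverse ↔ q.reverse = q := by
  constructor
  · intro h
    have h2 : u ++ (q.reverse ++ u.reverse) = u ++ (q ++ u.reverse) := by
      simpa [List.reverse_append, List.append_assoc] using h
    exact List.append_cancel_right (List.append_cancel_left h2)
  · intro h
    simp [List.reverse_append, List.append_assoc, h]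

theorem pvPalGe {sa p : List Char} (hk : sa.length ≤ p.length)
    (hp : (sa ++ p).reverse = sa ++ p) :
    ∃ q, p = q ++ sa.reverse ∧ q.reverse = q := by
  have hrev : p.reverse ++ sa.reverse = sa ++ p := by
    simpa [List.reverse_append] using hp
  have hlen : sa.length ≤ p.reverse.length := by simpa using hk
  have htake : p.reverse.take sa.length = sa := by
    have h1 := congrArg (List.take sa.length) hrev
    rwa [List.take_append_of_le_length hlen, List.take_left] at h1
  have hsplit : p.reverse = sa ++ p.reverse.drop sa.length := by
    conv_lhs => rw [← List.take_append_drop sa.length p.reverse, htake]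
  have hq : p = (p.reverse.drop sa.length).reverse ++ sa.reverse := by
    calc p = p.reverse.reverse := (List.reverse_reverse p).symm
    _ = (sa ++ p.reverse.drop sa.length).reverse := by rw [← hsplit]
    _ = (p.reverse.drop sa.length).reverse ++ sa.reverse := by
          rw [List.reverse_append]
  refine ⟨(p.reverse.drop sa.length).reverse, hq, ?_⟩
  have hre : sa ++ p = sa ++ (p.reverse.drop sa.length).reverse ++ sa.reverse := by
    conv_lhs => rw [hq]
    exact (List.append_assoc _ _ _).symm
  rw [hre] at hp
  exact (pvPalSandwich _ _).1 hp

theorem pvPalLt {sa p : List Char} (hk : p.length < sa.length)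
    (hp : (sa ++ p).reverse = sa ++ p) :
    p = (sa.take p.length).reverse ∧ (sa.drop p.length).reverse = sa.drop p.length := by
  have hrev : p.reverse ++ sa.reverse = sa ++ p := by
    simpa [List.reverse_append] using hp
  have h := congrArg (List.take p.length) hrev
  rw [List.take_append_of_le_length (by simp),
      List.take_append_of_le_length (le_of_lt hk)] at h
  have hself : p.reverse.take p.length = p.reverse :=
    List.take_of_length_le (by simp)
  rw [hself] at h
  set n := p.length with hn
  have hpe : p = (sa.take n).reverse := by
    rw [← h, List.reverse_reverse]
  refine ⟨hpe, ?_⟩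
  have hform : sa ++ p = sa.take n ++ sa.drop n ++ (sa.take n).reverse := by
    conv_lhs => rw [← List.take_append_drop n sa, hpe]
  rw [hform] at hp
  exact (pvPalSandwich _ _).1 hp

theorem pvPalDecomp {q : List Char} (hq : q.reverse = q) :
    ∃ u m, m.length ≤ 1 ∧ q = u ++ m ++ u.reverse := by
  set L := q.length with hL
  have hdrop : q.drop (L - L / 2) = (q.take (L / 2)).reverse := by
    conv_lhs => rw [← hq]
    rw [List.drop_reverse, ← hL]
    congr 2
    omega
  refine ⟨q.take (L / 2), (q.take (L - L / 2)).drop (L / 2), ?_, ?_⟩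
  · have h1 : (q.take (L - L / 2)).length = L - L / 2 := by
      rw [List.length_take, ← hL]
      exact Nat.min_eq_left (by omega)
    rw [List.length_drop, h1]
    omega
  · conv_lhs => rw [← List.take_append_drop (L - L / 2) q]
    rw [hdrop]
    congr 1
    conv_lhs => rw [← List.take_append_drop (L / 2) (q.take (L - L / 2))]
    rw [List.take_take, Nat.min_eq_left (by omega)]

-- ---- pvPairUp ----

theorem pvCountCons (a b : Char) (l : List Char) :
    List.count a (b :: l) = List.count a l + (if a = b then 1 else 0) := by
  rw [List.count_cons]
  by_cases h : a = b
  · simp [h]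
  · simp [h, Ne.symm h]

theorem pvCountSingleton (a b : Char) :
    List.count a [b] = if a = b then 1 else 0 := by
  rw [pvCountCons, List.count_nil, Nat.zero_add]

theorem pvCountErase (a b : Char) (l : List Char) :
    List.count a (l.erase b) = List.count a l - (if a = b then 1 else 0) := by
  by_cases h : a = b
  · subst h; rw [List.count_erase_self, if_pos rfl]
  · rw [List.count_erase_of_ne h, if_neg h]
    omega

theorem pvPairUp_counts_aux : ∀ (fuel : Nat) (l : List Char), l.length ≤ fuel →
    ∀ h m, pvPairUp l = some (h, m) →
    (∀ ch, List.count ch l = 2 * List.count ch h + List.count ch m) ∧ m.length ≤ 1 := by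
  intro fuel
  induction fuel with
  | zero =>
    intro l hl h m hpu
    match l, hl with
    | [], _ =>
      simp only [pvPairUp, Option.some.injEq, Prod.mk.injEq] at hpu
      obtain ⟨rfl, rfl⟩ := hpu
      simp
  | succ k ih =>
    intro l hl h m hpu
    match l with
    | [] =>
      simp only [pvPairUp, Option.some.injEq, Prod.mk.injEq] at hpu
      obtain ⟨rfl, rfl⟩ := hpu
      simp
    | [x] =>
      simp only [pvPairUp, Option.some.injEq, Prod.mk.injEq] at hpu
      obtain ⟨rfl, rfl⟩ := hpu
      refine ⟨fun ch => ?_, by simp⟩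
      rw [List.count_nil]
      omega
    | x :: y :: t =>
      by_cases hxy : x = y
      · subst hxy
        simp only [pvPairUp, BEq.rfl, if_true] at hpu
        cases hpt : pvPairUp t with
        | none => rw [hpt] at hpu; simp at hpu
        | some hm0 =>
          obtain ⟨h0, m0⟩ := hm0
          rw [hpt] at hpu
          simp only [Option.map_some, Option.some.injEq, Prod.mk.injEq] at hpu
          obtain ⟨rfl, rfl⟩ := hpu
          have hlt : t.length ≤ k := by
            simp only [List.length_cons] at hl; omega
          obtain ⟨hc, hlen⟩ := ih t hlt h0 m0 hpt
          refine ⟨fun ch => ?_, hlen⟩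
          have h1 := hc ch
          rw [pvCountCons, pvCountCons, pvCountCons (l := h0)]
          omega
      · have hbeq : (x == y) = false := by simpa using hxy
        simp only [pvPairUp, hbeq, Bool.false_eq_true, if_false] at hpu
        cases hpt : pvPairUp (y :: t) with
        | none => rw [hpt] at hpu; simp at hpu
        | some hm0 =>
          obtain ⟨h0, m0⟩ := hm0
          rw [hpt] at hpu
          cases m0 with
          | cons a b => simp at hpu
          | nil =>
            simp only [Option.some.injEq, Prod.mk.injEq] at hpu
            obtain ⟨rfl, rfl⟩ := hpu
            have hlt : (y :: t).length ≤ k := by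
              simp only [List.length_cons] at hl ⊢; omega
            obtain ⟨hc, _⟩ := ih (y :: t) hlt h0 [] hpt
            refine ⟨fun ch => ?_, by simp⟩
            have h1 := hc ch
            rw [List.count_nil] at h1
            rw [pvCountCons, h1, pvCountSingleton]
            omega

theorem pvPairUp_counts (l h m : List Char) (hpu : pvPairUp l = some (h, m)) :
    (∀ ch, List.count ch l = 2 * List.count ch h + List.count ch m) ∧ m.length ≤ 1 :=
  pvPairUp_counts_aux l.length l le_rfl h m hpu

theorem pvNotMemOfSortedNe {x y : Char} {t : List Char}
    (hs : (x :: y :: t).Pairwise (· ≤ ·)) (hxy : x ≠ y) : x ∉ y :: t := by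
  intro hmem
  obtain ⟨hx2, hrest⟩ := List.pairwise_cons.1 hs
  rcases List.mem_cons.1 hmem with h | h
  · exact hxy h
  · obtain ⟨hy2, _⟩ := List.pairwise_cons.1 hrest
    exact hxy (le_antisymm (hx2 y (List.mem_cons_self ..)) (hy2 x h))

theorem pvPairUp_even_aux : ∀ (fuel : Nat) (l : List Char), l.length ≤ fuel →
    l.Pairwise (· ≤ ·) →
    ∀ h' : List Char, (∀ ch, List.count ch l = 2 * List.count ch h') →
    ∃ h, pvPairUp l = some (h, []) := by
  intro fuel
  induction fuel with
  | zero =>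
    intro l hl hs h' hc
    match l, hl with
    | [], _ => exact ⟨[], rfl⟩
  | succ k ih =>
    intro l hl hs h' hc
    match l with
    | [] => exact ⟨[], rfl⟩
    | [x] =>
      exfalso
      have hcx := hc x
      rw [pvCountCons, List.count_nil, if_pos rfl] at hcx
      omega
    | x :: y :: t =>
      by_cases hxy : x = y
      · subst hxy
        have hcx := hc x
        rw [pvCountCons, pvCountCons, if_pos rfl] at hcx
        have hxh : x ∈ h' := by
          rw [← List.count_pos_iff]
          omega
        have hposx := List.count_pos_iff.2 hxh
        have hct : ∀ ch, List.count ch t = 2 * List.count ch (h'.erase x) := by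
          intro ch
          have h1 := hc ch
          rw [pvCountCons, pvCountCons] at h1
          rw [pvCountErase]
          by_cases hch : ch = x
          · rw [if_pos hch] at h1 ⊢
            rw [hch] at h1 ⊢
            omega
          · rw [if_neg hch] at h1 ⊢
            omega
        have hst : t.Pairwise (· ≤ ·) :=
          (List.pairwise_cons.1 (List.pairwise_cons.1 hs).2).2
        have hlt : t.length ≤ k := by
          simp only [List.length_cons] at hl; omega
        obtain ⟨h0, hpt⟩ := ih t hlt hst (h'.erase x) hct
        exact ⟨x :: h0, by simp only [pvPairUp, BEq.rfl, if_true, hpt, Option.map_some]⟩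
      · exfalso
        have hxnotin : x ∉ y :: t := pvNotMemOfSortedNe hs hxy
        have hcx := hc x
        rw [pvCountCons, if_pos rfl, List.count_eq_zero_of_not_mem hxnotin] at hcx
        omega

theorem pvPairUp_some_aux : ∀ (fuel : Nat) (l : List Char), l.length ≤ fuel →
    l.Pairwise (· ≤ ·) →
    ∀ h' m' : List Char, m'.length ≤ 1 →
    (∀ ch, List.count ch l = 2 * List.count ch h' + List.count ch m') →
    ∃ hm, pvPairUp l = some hm := by
  intro fuel
  induction fuel with
  | zero =>
    intro l hl hs h' m' hm1 hc
    match l, hl with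
    | [], _ => exact ⟨([], []), rfl⟩
  | succ k ih =>
    intro l hl hs h' m' hm1 hc
    match l with
    | [] => exact ⟨([], []), rfl⟩
    | [x] => exact ⟨([], [x]), rfl⟩
    | x :: y :: t =>
      by_cases hxy : x = y
      · subst hxy
        have hcx := hc x
        rw [pvCountCons, pvCountCons, if_pos rfl] at hcx
        have hmx : List.count x m' ≤ 1 :=
          le_trans (List.count_le_length ..) hm1
        have hxh : x ∈ h' := by
          rw [← List.count_pos_iff]
          omega
        have hposx := List.count_pos_iff.2 hxh
        have hct : ∀ ch, List.count ch t = 2 * List.count ch (h'.erase x) + List.count ch m' := by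
          intro ch
          have h1 := hc ch
          rw [pvCountCons, pvCountCons] at h1
          rw [pvCountErase]
          by_cases hch : ch = x
          · rw [if_pos hch] at h1 ⊢
            rw [hch] at h1 ⊢
            omega
          · rw [if_neg hch] at h1 ⊢
            omega
        have hst : t.Pairwise (· ≤ ·) :=
          (List.pairwise_cons.1 (List.pairwise_cons.1 hs).2).2
        have hlt : t.length ≤ k := by
          simp only [List.length_cons] at hl; omega
        obtain ⟨⟨h0, m0⟩, hpt⟩ := ih t hlt hst (h'.erase x) m' hm1 hct
        exact ⟨(x :: h0, m0), by simp only [pvPairUp, BEq.rfl, if_true, hpt, Option.map_some]⟩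
      · have hbeq : (x == y) = false := by simpa using hxy
        have hxnotin : x ∉ y :: t := pvNotMemOfSortedNe hs hxy
        have hz : List.count x (y :: t) = 0 := List.count_eq_zero_of_not_mem hxnotin
        have hcx := hc x
        rw [pvCountCons, if_pos rfl, hz] at hcx
        have hm'x : m' = [x] := by
          cases m' with
          | nil =>
            exfalso
            rw [List.count_nil] at hcx
            omega
          | cons a tl =>
            cases tl with
            | cons b tl2 => simp at hm1
            | nil =>
              by_cases hax : a = x
              · rw [hax]
              · exfalso
                rw [pvCountSingleton, if_neg (fun h => hax h.symm)] at hcx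
                omega
        have hyt : ∀ ch, List.count ch (y :: t) = 2 * List.count ch h' := by
          intro ch
          have h1 := hc ch
          rw [hm'x] at h1
          rw [pvCountCons, pvCountSingleton] at h1
          by_cases hch : ch = x
          · rw [if_pos hch] at h1
            omega
          · rw [if_neg hch] at h1
            omega
        obtain ⟨h0, hpt⟩ := pvPairUp_even_aux k (y :: t)
          (by simp only [List.length_cons] at hl ⊢; omega)
          (List.pairwise_cons.1 hs).2 h' hyt
        exact ⟨(h0, [x]), by simp only [pvPairUp, hbeq, Bool.false_eq_true, if_false, hpt]⟩

theorem pvPairUp_some (l : List Char) (hs : l.Pairwise (· ≤ ·))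
    (h' m' : List Char) (hm1 : m'.length ≤ 1)
    (hc : ∀ ch, List.count ch l = 2 * List.count ch h' + List.count ch m') :
    ∃ hm, pvPairUp l = some hm :=
  pvPairUp_some_aux l.length l le_rfl hs h' m' hm1 hc

-- ---- pvDistinctPerms ----

theorem pvDPGo_mem (l : List Char)
    (IH : ∀ r : List Char, r.length < l.length → ∀ v, v ∈ pvDistinctPerms r ↔ v.Perm r) :
    ∀ (cands : List Char) (u : List Char),
    u ∈ pvDPGo l cands ↔
      ∃ x ∈ cands, ∃ r, PySem.List.remove? l x = some r ∧ ∃ t, t.Perm r ∧ u = x :: t := by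
  intro cands
  induction cands with
  | nil => intro u; simp [pvDPGo]
  | cons x xs ihc =>
    intro u
    simp only [pvDPGo, List.mem_append]
    rw [ihc u]
    cases hr : PySem.List.remove? l x with
    | none =>
      constructor
      · rintro (h | ⟨x', hx', r, hrx, t, ht, rfl⟩)
        · simp at h
        · exact ⟨x', List.mem_cons_of_mem _ hx', r, hrx, t, ht, rfl⟩
      · rintro ⟨x', hx', r, hrx, t, ht, rfl⟩
        rcases List.mem_cons.1 hx' with rfl | hx'
        · rw [hr] at hrx; cases hrx
        · exact Or.inr ⟨x', hx', r, hrx, t, ht, rfl⟩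
    | some r =>
      constructor
      · rintro (h | ⟨x', hx', r', hrx, t, ht, rfl⟩)
        · rw [List.mem_map] at h
          obtain ⟨t, ht, rfl⟩ := h
          exact ⟨x, List.mem_cons_self .., r, hr, t,
            (IH r (pvRemoveLen hr) t).1 ht, rfl⟩
        · exact ⟨x', List.mem_cons_of_mem _ hx', r', hrx, t, ht, rfl⟩
      · rintro ⟨x', hx', r', hrx, t, ht, rfl⟩
        rcases List.mem_cons.1 hx' with rfl | hx'
        · rw [hr] at hrx
          injection hrx with hrx
          subst hrx
          exact Or.inl (List.mem_map.2 ⟨t, (IH r (pvRemoveLen hr) t).2 ht, rfl⟩)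
        · exact Or.inr ⟨x', hx', r', hrx, t, ht, rfl⟩

theorem pvDPerms_mem : ∀ (l : List Char) (u : List Char),
    u ∈ pvDistinctPerms l ↔ u.Perm l := by
  suffices H : ∀ (n : Nat) (l : List Char), l.length = n → ∀ u,
      u ∈ pvDistinctPerms l ↔ u.Perm l by
    intro l u; exact H l.length l rfl u
  intro n
  induction n using Nat.strong_induction_on with
  | _ n IH =>
    intro l hn u
    subst hn
    simp only [pvDistinctPerms]
    by_cases he : l.isEmpty
    · rw [if_pos he]
      have hle : l = [] := List.isEmpty_iff.1 he
      subst hle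
      simp [List.perm_nil]
    · rw [if_neg he]
      have hIH : ∀ r : List Char, r.length < l.length → ∀ v,
          v ∈ pvDistinctPerms r ↔ v.Perm r := by
        intro r hr v
        exact IH r.length hr r rfl v
      rw [pvDPGo_mem l hIH _ u]
      constructor
      · rintro ⟨x, hx, r, hr, t, ht, rfl⟩
        have hxl : x ∈ l := by
          rw [PySem.List.mem_sorted, PySem.Set.mem_ofList] at hx
          exact hx
        have hre : r = l.erase x := by
          rw [PySem.List.remove?_eq_some_erase l x hxl] at hr
          injection hr with hr
          exact hr.symm
        exact (List.cons_perm_iff_perm_erase).2 ⟨hxl, hre ▸ ht⟩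
      · intro hu
        have hne : l ≠ [] := by
          intro h; rw [h] at he; simp at he
        obtain ⟨x, t, rfl⟩ : ∃ x t, u = x :: t := by
          cases u with
          | nil => exact absurd (List.perm_nil.1 hu.symm) hne
          | cons x t => exact ⟨x, t, rfl⟩
        obtain ⟨hxl, ht⟩ := (List.cons_perm_iff_perm_erase).1 hu
        refine ⟨x, ?_, l.erase x, PySem.List.remove?_eq_some_erase l x hxl, t, ht, rfl⟩
        rw [PySem.List.mem_sorted, PySem.Set.mem_ofList]
        exact hxl

-- ---- the remove-fold ----

theorem pvRemFold_stuck (sa : List Char) :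
    sa.foldl (fun r? ch => r?.bind (fun r => PySem.List.remove? r ch))
      (none : Option (List Char)) = none := by
  induction sa with
  | nil => rfl
  | cons ch rest ih => simpa using ih

theorem pvRemFold_some : ∀ (sa ys r : List Char),
    sa.foldl (fun r? ch => r?.bind (fun r => PySem.List.remove? r ch)) (some ys) = some r →
    (∀ ch, List.count ch r + List.count ch sa = List.count ch ys) ∧ r.Sublist ys := by
  intro sa
  induction sa with
  | nil =>
    intro ys r h
    simp only [List.foldl_nil, Option.some.injEq] at h
    subst h
    exact ⟨fun ch => by simp, List.Sublist.refl _⟩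
  | cons ch rest ih =>
    intro ys r h
    rw [List.foldl_cons] at h
    have hstep : (Option.some ys).bind (fun r => PySem.List.remove? r ch)
        = PySem.List.remove? ys ch := rfl
    rw [hstep] at h
    cases hm : PySem.List.remove? ys ch with
    | none =>
      rw [hm, pvRemFold_stuck] at h
      cases h
    | some ys' =>
      rw [hm] at h
      obtain ⟨hc, hs⟩ := ih ys' r h
      have hmem : ch ∈ ys := by
        by_contra hx
        rw [(PySem.List.remove?_eq_none_iff ys ch).2 hx] at hm
        cases hm
      have hys' : ys' = ys.erase ch := by
        rw [PySem.List.remove?_eq_some_erase ys ch hmem] at hm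
        injection hm with hm
        exact hm.symm
      subst hys'
      refine ⟨fun c => ?_, hs.trans (List.erase_sublist ..)⟩
      have h1 := hc c
      have hpos := List.count_pos_iff.2 hmem
      by_cases hcc : c = ch
      · subst hcc
        rw [List.count_erase_self] at h1
        rw [List.count_cons_self]
        omega
      · rw [List.count_erase_of_ne hcc] at h1
        rw [pvCountCons, if_neg hcc]
        omega

theorem pvRemFold_none : ∀ (sa ys : List Char),
    sa.foldl (fun r? ch => r?.bind (fun r => PySem.List.remove? r ch)) (some ys) = none →
    ∀ q : List Char, (∀ ch, List.count ch q + List.count ch sa = List.count ch ys) → False := by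
  intro sa
  induction sa with
  | nil =>
    intro ys h
    simp at h
  | cons ch rest ih =>
    intro ys h q hq
    rw [List.foldl_cons] at h
    have hstep : (Option.some ys).bind (fun r => PySem.List.remove? r ch)
        = PySem.List.remove? ys ch := rfl
    rw [hstep] at h
    cases hm : PySem.List.remove? ys ch with
    | none =>
      have hch : ch ∉ ys := (PySem.List.remove?_eq_none_iff ys ch).1 hm
      have h1 := hq ch
      rw [List.count_cons_self, List.count_eq_zero_of_not_mem hch] at h1
      omega
    | some ys' =>
      rw [hm] at h
      have hmem : ch ∈ ys := by
        by_contra hx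
        rw [(PySem.List.remove?_eq_none_iff ys ch).2 hx] at hm
        cases hm
      have hys' : ys' = ys.erase ch := by
        rw [PySem.List.remove?_eq_some_erase ys ch hmem] at hm
        injection hm with hm
        exact hm.symm
      subst hys'
      refine ih (ys.erase ch) h q (fun c => ?_)
      have h1 := hq c
      have hpos := List.count_pos_iff.2 hmem
      by_cases hcc : c = ch
      · subst hcc
        rw [List.count_cons_self] at h1
        rw [List.count_erase_self]
        omega
      · rw [pvCountCons, if_neg hcc] at h1
        rw [List.count_erase_of_ne hcc]
        omega

-- ---- permutations: the converse of perm_of_mem_permutations ----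

theorem pvExistsIdx {x : Char} : ∀ {xs : List Char}, x ∈ xs →
    ∃ i, i < xs.length ∧ xs[i]? = some x ∧ xs.eraseIdx i = xs.erase x := by
  intro xs
  induction xs with
  | nil => intro h; cases h
  | cons y ys ih =>
    intro hx
    by_cases hxy : y = x
    · subst hxy
      refine ⟨0, by simp, by simp, ?_⟩
      simp [List.erase_cons_head]
    · obtain ⟨i, hi, hg, he⟩ := ih (by
        rcases List.mem_cons.1 hx with h | h
        · exact absurd h.symm hxy
        · exact h)
      refine ⟨i + 1, by simpa using Nat.succ_lt_succ hi, by simpa using hg, ?_⟩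
      rw [List.eraseIdx_cons_succ, he, List.erase_cons_tail (by simp [hxy])]

theorem pvMemPermutations : ∀ (xs p : List Char), p.Perm xs →
    p ∈ PySem.List.permutations xs xs.length := by
  suffices H : ∀ (n : Nat) (xs p : List Char), xs.length = n → p.Perm xs →
      p ∈ PySem.List.permutations xs n by
    intro xs p hp; exact H xs.length xs p rfl hp
  intro n
  induction n with
  | zero =>
    intro xs p hl hp
    have hxs : xs = [] := List.length_eq_zero_iff.1 hl
    subst hxs
    have hpn : p = [] := List.perm_nil.1 hp
    subst hpn
    simp [PySem.List.permutations]
  | succ r ihr =>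
    intro xs p hl hp
    have hpne : p ≠ [] := by
      intro h
      subst h
      have := List.perm_nil.1 hp.symm
      rw [this] at hl
      simp at hl
    obtain ⟨x, t, rfl⟩ := List.exists_cons_of_ne_nil hpne
    obtain ⟨hxl, ht⟩ := (List.cons_perm_iff_perm_erase).1 hp
    obtain ⟨i, hilt, hget, herase⟩ := pvExistsIdx hxl
    have hlen2 : (xs.eraseIdx i).length = r := by
      rw [List.length_eraseIdx_of_lt hilt]
      omega
    have ht2 : t ∈ PySem.List.permutations (xs.eraseIdx i) r :=
      ihr (xs.eraseIdx i) t hlen2 (by rw [herase]; exact ht)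
    simp only [PySem.List.permutations]
    rw [List.mem_flatMap]
    refine ⟨i, List.mem_range.2 hilt, ?_⟩
    rw [hget]
    exact List.mem_map.2 ⟨t, ht2, rfl⟩

-- ---- pvPalConcats: exactly the palindromes sa ++ p with p a rearrangement of bl ----

theorem pvPalConcats_mem (sa bl c : List Char) :
    c ∈ pvPalConcats sa bl ↔ ∃ p, p.Perm bl ∧ c = sa ++ p ∧ c.reverse = c := by
  simp only [pvPalConcats]
  by_cases hnk : bl.length < sa.length
  · rw [if_pos hnk]
    cases hcond : (PySem.List.sorted (sa.take bl.length).reverse (fun c => c) false ==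
        PySem.List.sorted bl (fun c => c) false) &&
        (sa.drop bl.length == (sa.drop bl.length).reverse) with
    | false =>
      rw [if_neg (by simp)]
      simp only [List.not_mem_nil, false_iff]
      rintro ⟨p, hperm, rfl, hpal⟩
      have hplen : p.length = bl.length := hperm.length_eq
      have hlt : p.length < sa.length := by omega
      obtain ⟨hpe, hmid⟩ := pvPalLt hlt hpal
      rw [hplen] at hpe hmid
      have hc1 : (PySem.List.sorted (sa.take bl.length).reverse (fun c => c) false ==
          PySem.List.sorted bl (fun c => c) false) = true := by
        rw [beq_iff_eq, PySem.List.sorted_id_eq_sorted_id_iff_perm, ← hpe]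
        exact hperm
      have hc2 : (sa.drop bl.length == (sa.drop bl.length).reverse) = true := by
        rw [beq_iff_eq]
        exact hmid.symm
      rw [hc1, hc2] at hcond
      cases hcond
    | true =>
      rw [if_pos rfl]
      simp only [Bool.and_eq_true, beq_iff_eq] at hcond
      obtain ⟨hsort, hmid⟩ := hcond
      simp only [List.mem_singleton]
      constructor
      · rintro rfl
        refine ⟨(sa.take bl.length).reverse, ?_, rfl, ?_⟩
        · rw [← PySem.List.sorted_id_eq_sorted_id_iff_perm]
          exact hsort
        · set t := sa.take bl.length with ht
          set d := sa.drop bl.length with hd0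
          have hsa : sa = t ++ d := by
            rw [ht, hd0, List.take_append_drop]
          rw [hsa]
          exact (pvPalSandwich t d).2 hmid.symm
      · rintro ⟨p, hperm, rfl, hpal⟩
        have hplen : p.length = bl.length := hperm.length_eq
        have hlt : p.length < sa.length := by omega
        obtain ⟨hpe, _⟩ := pvPalLt hlt hpal
        rw [hplen] at hpe
        rw [hpe]
  · rw [if_neg hnk]
    rw [Nat.not_lt] at hnk
    have hsortcnt : ∀ ch, List.count ch (PySem.List.sorted bl (fun c => c) false)
        = List.count ch bl :=
      fun ch => (PySem.List.sorted_perm bl (fun c => c) false).count_eq ch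
    cases hfold : sa.foldl (fun r? ch => r?.bind (fun r => PySem.List.remove? r ch))
        (some (PySem.List.sorted bl (fun c => c) false)) with
    | none =>
      simp only [List.not_mem_nil, false_iff]
      rintro ⟨p, hperm, rfl, hpal⟩
      have hk2 : sa.length ≤ p.length := by rw [hperm.length_eq]; exact hnk
      obtain ⟨q, hpe, hq⟩ := pvPalGe hk2 hpal
      refine pvRemFold_none sa _ hfold q (fun ch => ?_)
      have h1 : List.count ch p = List.count ch bl := hperm.count_eq ch
      rw [hpe, List.count_append, List.count_reverse] at h1
      have h2 := hsortcnt ch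
      omega
    | some rem =>
      obtain ⟨hcnt, hsub⟩ := pvRemFold_some sa _ rem hfold
      have hremsorted : rem.Pairwise (· ≤ ·) := by
        have hsp := PySem.List.sorted_pairwise bl (fun c => c)
        exact List.Pairwise.sublist hsub hsp
      cases hpu : pvPairUp rem with
      | none =>
        simp only [hpu, List.not_mem_nil, false_iff]
        rintro ⟨p, hperm, rfl, hpal⟩
        have hk2 : sa.length ≤ p.length := by rw [hperm.length_eq]; exact hnk
        obtain ⟨q, hpe, hq⟩ := pvPalGe hk2 hpal
        have hqr : ∀ ch, List.count ch q = List.count ch rem := by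
          intro ch
          have h1 := hcnt ch
          have h2 : List.count ch p = List.count ch bl := hperm.count_eq ch
          rw [hpe, List.count_append, List.count_reverse] at h2
          have h3 := hsortcnt ch
          omega
        obtain ⟨u, m, hm1, hqe⟩ := pvPalDecomp hq
        obtain ⟨hm, hsome⟩ := pvPairUp_some rem hremsorted u m hm1 (fun ch => by
          have h1 := hqr ch
          rw [hqe, List.count_append, List.count_append, List.count_reverse] at h1
          omega)
        rw [hsome] at hpu
        cases hpu
      | some hm =>
        obtain ⟨half, mid⟩ := hm
        simp only [hpu, List.mem_map]
        obtain ⟨hcnt2, hmid1⟩ := pvPairUp_counts rem half mid hpu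
        have hmidrev : mid.reverse = mid := by
          cases mid with
          | nil => rfl
          | cons a tl =>
            cases tl with
            | nil => rfl
            | cons b tl2 => simp at hmid1
        constructor
        · rintro ⟨u, hu, rfl⟩
          have hup : u.Perm half := (pvDPerms_mem half u).1 hu
          refine ⟨u ++ mid ++ u.reverse ++ sa.reverse, ?_, by simp [List.append_assoc], ?_⟩
          · rw [List.perm_iff_count]
            intro ch
            simp only [List.count_append, List.count_reverse]
            have h1 := hcnt ch
            have h2 := hcnt2 ch
            have h3 := hup.count_eq ch
            have h4 := hsortcnt ch
            omega
          · have hre : sa ++ u ++ mid ++ u.reverse ++ sa.reverse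
                = sa ++ (u ++ mid ++ u.reverse) ++ sa.reverse := by
              simp [List.append_assoc]
            rw [hre]
            exact (pvPalSandwich _ _).2 ((pvPalSandwich u mid).2 hmidrev)
        · rintro ⟨p, hperm, hce, hpal⟩
          subst hce
          have hk2 : sa.length ≤ p.length := by rw [hperm.length_eq]; exact hnk
          obtain ⟨q, hpe, hq⟩ := pvPalGe hk2 hpal
          obtain ⟨u, m, hm1, hqe⟩ := pvPalDecomp hq
          have hqr : ∀ ch, List.count ch q = List.count ch rem := by
            intro ch
            have h1 := hcnt ch
            have h2 : List.count ch p = List.count ch bl := hperm.count_eq ch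
            rw [hpe, List.count_append, List.count_reverse] at h2
            have h3 := hsortcnt ch
            omega
          have hparity : ∀ ch, List.count ch m = List.count ch mid := by
            intro ch
            have h1 := hqr ch
            rw [hqe, List.count_append, List.count_append, List.count_reverse] at h1
            have h2 := hcnt2 ch
            have hml : List.count ch m ≤ 1 := le_trans (List.count_le_length ..) hm1
            have hmidl : List.count ch mid ≤ 1 := le_trans (List.count_le_length ..) hmid1
            omega
          have hucnt : ∀ ch, List.count ch u = List.count ch half := by
            intro ch
            have h1 := hqr ch
            rw [hqe, List.count_append, List.count_append, List.count_reverse] at h1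
            have h2 := hcnt2 ch
            have h3 := hparity ch
            omega
          have hmeq : m = mid := by
            have hp2 : m.Perm mid := List.perm_iff_count.2 hparity
            cases m with
            | nil => exact (List.perm_nil.1 hp2.symm).symm
            | cons a tl =>
              cases tl with
              | cons b tl2 => simp at hm1
              | nil => exact (List.perm_singleton.1 hp2.symm).symm
          rw [hmeq] at hqe
          refine ⟨u, (pvDPerms_mem half u).2 (List.perm_iff_count.2 hucnt), ?_⟩
          rw [hpe, hqe]
          simp [List.append_assoc]

-- ---- small bridges ----

theorem pvMemIfAppend {β : Type} (cond : Bool) (cand c : β) (acc : List β) :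
    c ∈ (if cond then acc ++ [cand] else acc) ↔ c ∈ acc ∨ (cond = true ∧ c = cand) := by
  cases cond
  · simp
  · simp [List.mem_append]

theorem pvMemIfAdd (cond : Bool) (v c : List Char) (s : PySem.Set (List Char)) :
    c ∈ (if cond then PySem.Set.add s v else s) ↔ c ∈ s ∨ (cond = true ∧ c = v) := by
  cases cond
  · simp
  · simp [PySem.Set.mem_add]

theorem pvIsPalA_iff (s : List Char) : pvIsPalA s = true ↔ s.reverse = s := by
  unfold pvIsPalA
  rw [beq_iff_eq]
  exact eq_comm

theorem pvSubs_intro (l : List Char) {i j : Int}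
    (hi : i ∈ PySem.List.pyRange 0 (l.length : Int))
    (hj : j ∈ PySem.List.pyRange (i + 1) ((l.length : Int) + 1)) :
    PySem.List.slice l (some i) (some j) ∈ pvSubs l := by
  unfold pvSubs
  exact List.mem_flatMap.2 ⟨i, hi, List.mem_map.2 ⟨j, hj, rfl⟩⟩

theorem pvSubs_elim {l s : List Char} (hs : s ∈ pvSubs l) :
    ∃ i j : Int, i ∈ PySem.List.pyRange 0 (l.length : Int) ∧
      j ∈ PySem.List.pyRange (i + 1) ((l.length : Int) + 1) ∧
      s = PySem.List.slice l (some i) (some j) := by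
  unfold pvSubs at hs
  obtain ⟨i, hi, hmap⟩ := List.mem_flatMap.1 hs
  obtain ⟨j, hj, hsl⟩ := List.mem_map.1 hmap
  exact ⟨i, j, hi, hj, hsl.symm⟩

theorem pvSubs_count2 (l : List Char) {i j : Int}
    (hi : i ∈ PySem.List.pyRange 0 (l.length : Int))
    (hj : j ∈ PySem.List.pyRange (i + 1) ((l.length : Int) + 1)) :
    ∀ ch, List.count ch (PySem.List.slice l (some i) (some j)) ≤ List.count ch l := by
  intro ch
  have h1 := PySem.List.mem_pyRange_one.1 hi
  have h2 := PySem.List.mem_pyRange_one.1 hj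
  exact pvCountSlice_le l h1.1 (by omega) ch

theorem pvCounterOK_cand {al bl sa sb c : List Char}
    (hsa : ∀ ch, List.count ch sa ≤ List.count ch al)
    (hsb : ∀ ch, List.count ch sb ≤ List.count ch bl)
    (hor : c = sa ++ sb ∨ c = sb ++ sa) : pvCounterOK c (al ++ bl) = true := by
  apply pvCounterOK_true
  intro ch
  rw [List.count_append]
  have h1 := hsa ch
  have h2 := hsb ch
  rcases hor with rfl | rfl <;> rw [List.count_append] <;> omega

theorem pvCounterOK_perm {al bl sa p c : List Char}
    (hsa : ∀ ch, List.count ch sa ≤ List.count ch al)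
    (hp : p.Perm bl) (hor : c = sa ++ p ∨ c = p ++ sa) :
    pvCounterOK c (al ++ bl) = true := by
  apply pvCounterOK_true
  intro ch
  rw [List.count_append]
  have h1 := hsa ch
  have h2 := hp.count_eq ch
  rcases hor with rfl | rfl <;> rw [List.count_append] <;> omega

theorem pvFlip (sa bl c : List Char) :
    (∃ p, p.Perm bl ∧ c = p ++ sa ∧ c.reverse = c) ↔
    (∃ p, p.Perm bl ∧ c = sa.reverse ++ p ∧ c.reverse = c) := by
  constructor
  · rintro ⟨p, hp, rfl, hrev⟩
    refine ⟨p.reverse, (List.reverse_perm p).trans hp, ?_, hrev⟩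
    conv_lhs => rw [← hrev]
    rw [List.reverse_append]
  · rintro ⟨p, hp, rfl, hrev⟩
    refine ⟨p.reverse, (List.reverse_perm p).trans hp, ?_, hrev⟩
    conv_lhs => rw [← hrev]
    rw [List.reverse_append, List.reverse_reverse]

-- ---- membership in A's accumulators ----

theorem pvMemPart1A (al bl : List Char) (c : List Char) :
    c ∈ pvPart1A al bl ↔
      ∃ sa ∈ pvSubs al, ∃ sb ∈ pvSubs bl,
        (c = sa ++ sb ∨ c = sb ++ sa) ∧ c.reverse = c := by
  have h5 : ∀ (sa sb : List Char) (acc : List (List Char)) (cc : List Char),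
      cc ∈ List.foldl (fun acc4 cand =>
          if pvIsPalA cand && pvCounterOK cand (al ++ bl) then acc4 ++ [cand] else acc4)
        acc [sa ++ sb, sb ++ sa] ↔
      cc ∈ acc ∨ ∃ cand ∈ [sa ++ sb, sb ++ sa],
        (pvIsPalA cand && pvCounterOK cand (al ++ bl)) = true ∧ cc = cand :=
    fun sa sb acc cc =>
      pvMemSetFoldl _ _ _ (fun s x c0 =>
        pvMemIfAppend (pvIsPalA x && pvCounterOK x (al ++ bl)) x c0 s) acc cc
  have h4 : ∀ (sa : List Char) (acc : List (List Char)) (cc : List Char),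
      cc ∈ List.foldl (fun acc2 sB =>
          List.foldl (fun acc3 eB =>
              List.foldl (fun acc4 cand =>
                  if pvIsPalA cand && pvCounterOK cand (al ++ bl) then acc4 ++ [cand] else acc4)
                acc3 [sa ++ PySem.List.slice bl (some sB) (some eB),
                      PySem.List.slice bl (some sB) (some eB) ++ sa])
            acc2 (PySem.List.pyRange (sB + 1) ((bl.length : Int) + 1)))
        acc (PySem.List.pyRange 0 (bl.length : Int)) ↔
      cc ∈ acc ∨ ∃ sB ∈ PySem.List.pyRange 0 (bl.length : Int),
        ∃ eB ∈ PySem.List.pyRange (sB + 1) ((bl.length : Int) + 1),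
        ∃ cand ∈ [sa ++ PySem.List.slice bl (some sB) (some eB),
                   PySem.List.slice bl (some sB) (some eB) ++ sa],
          (pvIsPalA cand && pvCounterOK cand (al ++ bl)) = true ∧ cc = cand :=
    fun sa acc cc =>
      pvMemSetFoldl (PySem.List.pyRange 0 (bl.length : Int)) _ _ (fun s x c0 =>
        pvMemSetFoldl (PySem.List.pyRange (x + 1) ((bl.length : Int) + 1)) _ _
          (fun s2 y c2 =>
            h5 sa (PySem.List.slice bl (some x) (some y)) s2 c2) s c0) acc cc
  have htop : c ∈ pvPart1A al bl ↔
      c ∈ ([] : List (List Char)) ∨ ∃ sA ∈ PySem.List.pyRange 0 (al.length : Int),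
        ∃ eA ∈ PySem.List.pyRange (sA + 1) ((al.length : Int) + 1),
        ∃ sB ∈ PySem.List.pyRange 0 (bl.length : Int),
        ∃ eB ∈ PySem.List.pyRange (sB + 1) ((bl.length : Int) + 1),
        ∃ cand ∈ [PySem.List.slice al (some sA) (some eA) ++ PySem.List.slice bl (some sB) (some eB),
                   PySem.List.slice bl (some sB) (some eB) ++ PySem.List.slice al (some sA) (some eA)],
          (pvIsPalA cand && pvCounterOK cand (al ++ bl)) = true ∧ c = cand := by
    unfold pvPart1A
    exact pvMemSetFoldl (PySem.List.pyRange 0 (al.length : Int)) _ _ (fun s sA c0 =>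
      pvMemSetFoldl (PySem.List.pyRange (sA + 1) ((al.length : Int) + 1)) _ _
        (fun s1 eA c1 =>
          h4 (PySem.List.slice al (some sA) (some eA)) s1 c1) s c0) [] c
  rw [htop]
  simp only [List.not_mem_nil, false_or]
  constructor
  · rintro ⟨sA, hsA, eA, heA, sB, hsB, eB, heB, cand, hcand, hcond, rfl⟩
    rw [Bool.and_eq_true] at hcond
    refine ⟨PySem.List.slice al (some sA) (some eA), pvSubs_intro al hsA heA,
      PySem.List.slice bl (some sB) (some eB), pvSubs_intro bl hsB heB, ?_, ?_⟩
    · simpa using hcand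
    · rw [pvIsPalA_iff] at hcond
      exact hcond.1
  · rintro ⟨sa, hsa, sb, hsb, hor, hrev⟩
    obtain ⟨iA, jA, hiA, hjA, rfl⟩ := pvSubs_elim hsa
    obtain ⟨iB, jB, hiB, hjB, rfl⟩ := pvSubs_elim hsb
    refine ⟨iA, hiA, jA, hjA, iB, hiB, jB, hjB, c, ?_, ?_, rfl⟩
    · simpa using hor
    · rw [Bool.and_eq_true, pvIsPalA_iff]
      exact ⟨hrev, pvCounterOK_cand (pvSubs_count2 al hiA hjA) (pvSubs_count2 bl hiB hjB) hor⟩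

theorem pvMemPart2A (al bl : List Char) (acc : List (List Char)) (c : List Char) :
    c ∈ pvPart2A al bl acc ↔ c ∈ acc ∨
      ∃ sa ∈ pvSubs al, ∃ p : List Char, p.Perm bl ∧
        (c = sa ++ p ∨ c = p ++ sa) ∧ c.reverse = c ∧ c.length ≤ 20 := by
  have h5 : ∀ (sa pm : List Char) (acc : List (List Char)) (cc : List Char),
      cc ∈ List.foldl (fun acc3 cand =>
          if pvIsPalA cand && decide ((cand.length : Int) ≤ 20) &&
              pvCounterOK cand (al ++ bl) then acc3 ++ [cand] else acc3)
        acc [sa ++ pm, pm ++ sa] ↔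
      cc ∈ acc ∨ ∃ cand ∈ [sa ++ pm, pm ++ sa],
        (pvIsPalA cand && decide ((cand.length : Int) ≤ 20) &&
          pvCounterOK cand (al ++ bl)) = true ∧ cc = cand :=
    fun sa pm acc cc =>
      pvMemSetFoldl _ _ _ (fun s x c0 =>
        pvMemIfAppend (pvIsPalA x && decide ((x.length : Int) ≤ 20) &&
          pvCounterOK x (al ++ bl)) x c0 s) acc cc
  have htop : c ∈ pvPart2A al bl acc ↔
      c ∈ acc ∨ ∃ sA ∈ PySem.List.pyRange 0 (al.length : Int),
        ∃ eA ∈ PySem.List.pyRange (sA + 1) ((al.length : Int) + 1),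
        ∃ pm ∈ PySem.Set.ofList (PySem.List.permutations bl bl.length),
        ∃ cand ∈ [PySem.List.slice al (some sA) (some eA) ++ pm,
                   pm ++ PySem.List.slice al (some sA) (some eA)],
          (pvIsPalA cand && decide ((cand.length : Int) ≤ 20) &&
            pvCounterOK cand (al ++ bl)) = true ∧ c = cand := by
    unfold pvPart2A
    exact pvMemSetFoldl (PySem.List.pyRange 0 (al.length : Int)) _ _ (fun s sA c0 =>
      pvMemSetFoldl (PySem.List.pyRange (sA + 1) ((al.length : Int) + 1)) _ _
        (fun s1 eA c1 =>
          pvMemSetFoldl (PySem.Set.ofList (PySem.List.permutations bl bl.length)) _ _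
            (fun s2 pm c2 =>
              h5 (PySem.List.slice al (some sA) (some eA)) pm s2 c2) s1 c1) s c0) acc c
  rw [htop]
  refine or_congr Iff.rfl ?_
  constructor
  · rintro ⟨sA, hsA, eA, heA, pm, hpm, cand, hcand, hcond, rfl⟩
    have hperm : pm.Perm bl := by
      rw [PySem.Set.mem_ofList] at hpm
      exact PySem.List.perm_of_mem_permutations hpm
    simp only [Bool.and_eq_true] at hcond
    obtain ⟨⟨hpal, hlen⟩, hok⟩ := hcond
    refine ⟨PySem.List.slice al (some sA) (some eA), pvSubs_intro al hsA heA,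
      pm, hperm, ?_, ?_, ?_⟩
    · simpa using hcand
    · rw [pvIsPalA_iff] at hpal
      exact hpal
    · rw [decide_eq_true_eq] at hlen
      exact_mod_cast hlen
  · rintro ⟨sa, hsa, p, hperm, hor, hrev, hlen⟩
    obtain ⟨iA, jA, hiA, hjA, rfl⟩ := pvSubs_elim hsa
    refine ⟨iA, hiA, jA, hjA, p, ?_, c, ?_, ?_, rfl⟩
    · rw [PySem.Set.mem_ofList]
      exact pvMemPermutations bl p hperm
    · simpa using hor
    · simp only [Bool.and_eq_true]
      refine ⟨⟨?_, ?_⟩, ?_⟩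
      · rw [pvIsPalA_iff]
        exact hrev
      · rw [decide_eq_true_eq]
        exact_mod_cast hlen
      · exact pvCounterOK_perm (pvSubs_count2 al hiA hjA) hperm hor

theorem pvStep1B (sa sb c : List Char) (s : PySem.Set (List Char)) :
    c ∈ (if sb ++ sa == (sb ++ sa).reverse then
           PySem.Set.add (if sa ++ sb == (sa ++ sb).reverse then PySem.Set.add s (sa ++ sb) else s)
             (sb ++ sa)
         else (if sa ++ sb == (sa ++ sb).reverse then PySem.Set.add s (sa ++ sb) else s)) ↔
      c ∈ s ∨ (((sa ++ sb == (sa ++ sb).reverse) = true ∧ c = sa ++ sb) ∨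
               ((sb ++ sa == (sb ++ sa).reverse) = true ∧ c = sb ++ sa)) := by
  rw [pvMemIfAdd, pvMemIfAdd]
  tauto

theorem pvStep2B (sa bl c : List Char) (s : PySem.Set (List Char)) :
    c ∈ (if decide ((sa.length : Int) + (bl.length : Int) ≤ 20) then
           PySem.Set.update (PySem.Set.update s (pvPalConcats sa bl)) (pvPalConcats sa.reverse bl)
         else s) ↔
      c ∈ s ∨ ((decide ((sa.length : Int) + (bl.length : Int) ≤ 20) = true) ∧
        (c ∈ pvPalConcats sa bl ∨ c ∈ pvPalConcats sa.reverse bl)) := by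
  by_cases hlen : decide ((sa.length : Int) + (bl.length : Int) ≤ 20) = true
  · rw [if_pos hlen, PySem.Set.mem_update, PySem.Set.mem_update]
    constructor
    · rintro ((h | h) | h)
      · exact Or.inl h
      · exact Or.inr ⟨hlen, Or.inl h⟩
      · exact Or.inr ⟨hlen, Or.inr h⟩
    · rintro (h | ⟨_, (h | h)⟩)
      · exact Or.inl (Or.inl h)
      · exact Or.inl (Or.inr h)
      · exact Or.inr h
  · rw [if_neg hlen]
    constructor
    · exact Or.inl
    · rintro (h | ⟨hl, _⟩)
      · exact h
      · exact absurd hl hlen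

theorem pvMemPart1B (sA sB : List (List Char)) (c : List Char) :
    c ∈ pvPart1B (PySem.Set.ofList sA) (PySem.Set.ofList sB) ↔
      ∃ sa ∈ sA, ∃ sb ∈ sB,
        (c = sa ++ sb ∨ c = sb ++ sa) ∧ c.reverse = c := by
  unfold pvPart1B
  have hin : ∀ (sa : List Char) (s : PySem.Set (List Char)) (cc : List Char),
      cc ∈ List.foldl (fun acc2 sb =>
        if sb ++ sa == (sb ++ sa).reverse then
          PySem.Set.add
            (if sa ++ sb == (sa ++ sb).reverse then PySem.Set.add acc2 (sa ++ sb) else acc2)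
            (sb ++ sa)
        else
          (if sa ++ sb == (sa ++ sb).reverse then PySem.Set.add acc2 (sa ++ sb) else acc2))
        s (PySem.Set.ofList sB) ↔
      cc ∈ s ∨ ∃ sb ∈ PySem.Set.ofList sB,
        (((sa ++ sb == (sa ++ sb).reverse) = true ∧ cc = sa ++ sb) ∨
         ((sb ++ sa == (sb ++ sa).reverse) = true ∧ cc = sb ++ sa)) :=
    fun sa s cc => pvMemSetFoldl _ _ _ (fun s2 sb c2 => pvStep1B sa sb c2 s2) s cc
  refine Iff.trans (pvMemSetFoldl _ _ _ (fun s sa c0 => hin sa s c0) PySem.Set.empty c) ?_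
  constructor
  · rintro (h | ⟨sa, hsa, sb, hsb, hor⟩)
    · simp [PySem.Set.empty] at h
    · rw [PySem.Set.mem_ofList] at hsa hsb
      refine ⟨sa, hsa, sb, hsb, ?_⟩
      rcases hor with ⟨hb, rfl⟩ | ⟨hb, rfl⟩
      · rw [beq_iff_eq] at hb
        exact ⟨Or.inl rfl, hb.symm⟩
      · rw [beq_iff_eq] at hb
        exact ⟨Or.inr rfl, hb.symm⟩
  · rintro ⟨sa, hsa, sb, hsb, hor, hrev⟩
    refine Or.inr ⟨sa, (PySem.Set.mem_ofList sA sa).2 hsa,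
      sb, (PySem.Set.mem_ofList sB sb).2 hsb, ?_⟩
    rcases hor with rfl | rfl
    · exact Or.inl ⟨by rw [beq_iff_eq]; exact hrev.symm, rfl⟩
    · exact Or.inr ⟨by rw [beq_iff_eq]; exact hrev.symm, rfl⟩

theorem pvMemPart2B (sA : List (List Char)) (bl : List Char)
    (acc : PySem.Set (List Char)) (c : List Char) :
    c ∈ pvPart2B (PySem.Set.ofList sA) bl acc ↔ c ∈ acc ∨
      ∃ sa ∈ sA, ∃ p : List Char, p.Perm bl ∧
        (c = sa ++ p ∨ c = p ++ sa) ∧ c.reverse = c ∧ c.length ≤ 20 := by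
  unfold pvPart2B
  refine Iff.trans (pvMemSetFoldl _ _ (fun sa cc =>
      (decide ((sa.length : Int) + (bl.length : Int) ≤ 20) = true) ∧
        (cc ∈ pvPalConcats sa bl ∨ cc ∈ pvPalConcats sa.reverse bl))
      (fun s sa c0 => pvStep2B sa bl c0 s) acc c) ?_
  · refine or_congr Iff.rfl ?_
    constructor
    · rintro ⟨sa, hsa, hlen, (h | h)⟩
      · obtain ⟨p, hp, hce, hrev⟩ := (pvPalConcats_mem sa bl c).1 h
        rw [PySem.Set.mem_ofList] at hsa
        rw [decide_eq_true_eq] at hlen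
        refine ⟨sa, hsa, p, hp, Or.inl hce, hrev, ?_⟩
        rw [hce, List.length_append, hp.length_eq]
        omega
      · obtain ⟨p, hp, hce, hrev⟩ := (pvPalConcats_mem sa.reverse bl c).1 h
        obtain ⟨p2, hp2, hce2, _⟩ := (pvFlip sa bl c).2 ⟨p, hp, hce, hrev⟩
        rw [PySem.Set.mem_ofList] at hsa
        rw [decide_eq_true_eq] at hlen
        refine ⟨sa, hsa, p2, hp2, Or.inr hce2, hrev, ?_⟩
        rw [hce2, List.length_append, hp2.length_eq]
        omega
    · rintro ⟨sa, hsa, p, hp, hor, hrev, hlen20⟩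
      have hlenc : c.length = sa.length + bl.length := by
        rcases hor with rfl | rfl
        · rw [List.length_append, hp.length_eq]
        · rw [List.length_append, hp.length_eq]
          omega
      refine ⟨sa, (PySem.Set.mem_ofList sA sa).2 hsa, ?_, ?_⟩
      · rw [decide_eq_true_eq]
        omega
      · rcases hor with hce | hce
        · exact Or.inl ((pvPalConcats_mem sa bl c).2 ⟨p, hp, hce, hrev⟩)
        · exact Or.inr ((pvPalConcats_mem sa.reverse bl c).2
            ((pvFlip sa bl c).1 ⟨p, hp, hce, hrev⟩))

theorem pvNodupPart1B (subsA subsB : PySem.Set (List Char)) :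
    (pvPart1B subsA subsB).Nodup := by
  unfold pvPart1B
  refine pvNodupFoldl _ _ _ (fun s sa hs => ?_) List.nodup_nil
  refine pvNodupFoldl _ _ _ (fun s2 sb hs2 => ?_) hs
  dsimp only
  split_ifs
  · exact PySem.Set.nodup_add _ _ (PySem.Set.nodup_add _ _ hs2)
  · exact PySem.Set.nodup_add _ _ hs2
  · exact PySem.Set.nodup_add _ _ hs2
  · exact hs2

theorem pvNodupPart2B (subsA : PySem.Set (List Char)) (bl : List Char)
    (acc : PySem.Set (List Char)) (h : acc.Nodup) : (pvPart2B subsA bl acc).Nodup := by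
  unfold pvPart2B
  refine pvNodupFoldl _ _ _ (fun s sa hs => ?_) h
  dsimp only
  split_ifs
  · exact PySem.Set.nodup_update _ _ (PySem.Set.nodup_update _ _ hs)
  · exact hs

-- ===== VERDICT (by name: the statement is the Claim_ definition above) =====
theorem try_overlapping_substrings_spec : Claim_equal_try_overlapping_substrings := by
  intro a b _
  unfold Spec_try_overlapping_substrings
  unfold try_overlapping_substrings try_overlapping_substrings_alt
  apply PySem.List.sorted_eq_sorted_of_perm _ _ _ (fun s t h => h)
  apply List.Perm.map
  have hnodB : (if a == b then
        pvPart2B (PySem.Set.ofList (pvSubs a.toList)) b.toList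
          (pvPart1B (PySem.Set.ofList (pvSubs a.toList)) (PySem.Set.ofList (pvSubs b.toList)))
      else
        pvPart1B (PySem.Set.ofList (pvSubs a.toList))
          (PySem.Set.ofList (pvSubs b.toList))).Nodup := by
    split
    · exact pvNodupPart2B _ _ _ (pvNodupPart1B _ _)
    · exact pvNodupPart1B _ _
  rw [List.perm_ext_iff_of_nodup (PySem.Set.nodup_ofList _) hnodB]
  intro c
  rw [PySem.Set.mem_ofList]
  by_cases hab : a = b
  · simp only [hab, BEq.rfl, if_true]
    rw [pvMemPart2A, pvMemPart2B, pvMemPart1A, pvMemPart1B]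
  · have : (a == b) = false := by simp [hab]
    simp only [this, Bool.false_eq_true, if_false]
    rw [pvMemPart1A, pvMemPart1B]
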